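-- pv_equiv track=rewrite | github.com/TravelMapping/DataProcessing | siteupdate/python-teresco/siteupdate.py | valid_num_str
-- ===== SOURCE A (Python) =====
-- def valid_num_str(data):
--     point_count = 0
--     # check initial character
--     if data[0] == '.':
--         point_count = 1
--     elif data[0] < '0' and data[0] != '-' or data[0] > '9':
--         return False
--     # check subsequent characters
--     for c in data[1:]:
--         # check for minus sign not at beginning
--         if c == '-':
--             return False
--         # check for multiple decimal points
--         if c == '.':
--             point_count += 1
--             if point_count > 1:
--                 return False
--         # check for invalid characters
--         elif c < '0' or c > '9':
--             return False
--     return True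
-- ===== SOURCE B (Python) =====
-- def valid_num_str(data):
--     # touch data[0] first: preserves IndexError on empty input like A
--     body = data[1:] if data[0] == '-' else data
--     return body.count('.') <= 1 and all(c == '.' or '0' <= c <= '9' for c in body)
-- ===== Notes on version B (the rewrite author's own statement) =====
-- stated objective: simpler
-- what changed: Replaces A's single stateful scan with early returns and a decimal-point counter by an optional strip of a leading '-', an aggregate count('.') <= 1, and an all()-over-characters digit-or-dot check.
import Mathlib
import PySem

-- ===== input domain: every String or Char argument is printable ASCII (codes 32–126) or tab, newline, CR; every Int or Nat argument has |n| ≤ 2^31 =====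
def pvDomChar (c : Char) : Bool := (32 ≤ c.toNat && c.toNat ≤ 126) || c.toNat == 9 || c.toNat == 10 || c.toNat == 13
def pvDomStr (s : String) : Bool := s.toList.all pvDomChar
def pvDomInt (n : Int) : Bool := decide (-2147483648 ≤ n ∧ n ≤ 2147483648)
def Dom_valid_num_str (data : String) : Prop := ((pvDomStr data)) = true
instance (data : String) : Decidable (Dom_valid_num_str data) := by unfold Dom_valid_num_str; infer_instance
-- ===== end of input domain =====

-- B replaces A's stateful char-by-char scan (early returns, decimal-point counter) by an
-- optional strip of a leading '-' followed by an aggregate count('.') check plus an all() digit-or-dot check.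


-- ===== PORT A =====
-- the 'for c in data[1:]' loop carrying point_count
def validNumLoopA : List Char → Int → Bool
  | [], _ => true
  | c :: rest, pc =>
    if c = '-' then false
    else if c = '.' then
      if pc + 1 > 1 then false else validNumLoopA rest (pc + 1)
    else if c < '0' ∨ c > '9' then false
    else validNumLoopA rest pc

def valid_num_str (data : String) : Bool :=
  match data.toList with
  | [] => false   -- Python raises IndexError on data[0]; excluded by Pre_
  | c0 :: rest =>
    if c0 = '.' then validNumLoopA rest 1
    else if (c0 < '0' ∧ c0 ≠ '-') ∨ c0 > '9' then false
    else validNumLoopA rest 0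

-- ===== PORT B =====
-- the 'all(...)' predicate of Source B: c == '.' or '0' <= c <= '9'
def okChar (c : Char) : Bool := c = '.' || ('0' ≤ c && c ≤ '9')

def valid_num_str_alt (data : String) : Bool :=
  match data.toList with
  | [] => false   -- Python raises IndexError on data[0]; excluded by Pre_
  | c0 :: rest =>
    let body := if c0 = '-' then rest else c0 :: rest
    decide (body.count '.' ≤ 1) && body.all okChar

-- ===== PRECONDITION & SPEC =====
-- A evaluates data[0], which raises IndexError on the empty string; Pre_ excludes exactly that.
def Pre_valid_num_str (data : String) : Prop := data ≠ ""
instance (data : String) : Decidable (Pre_valid_num_str data) := by unfold Pre_valid_num_str; infer_instance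
def pvWitness_valid_num_str : String := "-3.5"

def Spec_valid_num_str (data : String) (out : Bool) : Prop := out = valid_num_str_alt data
instance (data : String) (out : Bool) : Decidable (Spec_valid_num_str data out) := by unfold Spec_valid_num_str; infer_instance

-- ===== CLAIM =====
def Claim_equal_valid_num_str : Prop := ∀ (data : String), Dom_valid_num_str data → Pre_valid_num_str data → Spec_valid_num_str data (valid_num_str data)

-- ===== LEMMAS AND PROOFS =====
theorem validNumLoopA_char (l : List Char) :
    (validNumLoopA l 0 = (decide (l.count '.' ≤ 1) && l.all okChar)) ∧
    (validNumLoopA l 1 = (decide (l.count '.' = 0) && l.all okChar)) := by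
  induction l with
  | nil => simp [validNumLoopA]
  | cons c rest ih =>
    obtain ⟨ih0, ih1⟩ := ih
    by_cases hm : c = '-'
    · subst hm
      constructor <;> simp [validNumLoopA, okChar, List.all_cons]
    · by_cases hd : c = '.'
      · subst hd
        have hiff : (rest.count '.' + 1 ≤ 1) ↔ (rest.count '.' = 0) := by omega
        constructor
        · norm_num [validNumLoopA, ih1, okChar, List.count_cons, List.all_cons, hiff]
          exact fun _ _ => by decide
        · norm_num [validNumLoopA, List.count_cons]
      · by_cases hbad : c < '0' ∨ c > '9'
        · have hok : okChar c = false := by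
            simp only [okChar, Bool.or_eq_false_iff, Bool.and_eq_false_iff]
            refine ⟨by simp [hd], ?_⟩
            rcases hbad with h | h
            · left; simp [not_le.mpr h]
            · right; simp [not_le.mpr h]
          constructor <;>
            simp [validNumLoopA, hm, hd, hbad, List.all_cons, hok]
        · have hok : okChar c = true := by
            push Not at hbad
            simp only [okChar, Bool.or_eq_true, Bool.and_eq_true, decide_eq_true_eq]
            exact Or.inr ⟨hbad.1, hbad.2⟩
          constructor <;>
            simp [validNumLoopA, hm, hd, hbad, List.all_cons, hok, ih0, ih1]

-- ===== VERDICT =====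
theorem valid_num_str_spec : Claim_equal_valid_num_str := by
  intro data _ _
  show valid_num_str data = valid_num_str_alt data
  unfold valid_num_str valid_num_str_alt
  cases h : data.toList with
  | nil => rfl
  | cons c0 rest =>
    by_cases hdot : c0 = '.'
    · subst hdot
      have hiff : (rest.count '.' + 1 ≤ 1) ↔ (rest.count '.' = 0) := by omega
      simp [(validNumLoopA_char rest).2, List.all_cons, okChar, hiff]
    · by_cases hm : c0 = '-'
      · subst hm
        have : ¬ (('-' < '0' ∧ ('-' : Char) ≠ '-') ∨ ('-' : Char) > '9') := by decide
        simp only [if_neg hdot, if_neg this, (validNumLoopA_char rest).1]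
        rfl
      · by_cases hbad : (c0 < '0' ∧ c0 ≠ '-') ∨ c0 > '9'
        · have hok : okChar c0 = false := by
            simp only [okChar, Bool.or_eq_false_iff, Bool.and_eq_false_iff]
            refine ⟨by simp [hdot], ?_⟩
            rcases hbad with ⟨h, _⟩ | h
            · left; simp [not_le.mpr h]
            · right; simp [not_le.mpr h]
          simp only [if_neg hdot, if_pos hbad, if_neg hm, List.all_cons, hok]
          simp
        · have hok : okChar c0 = true := by
            push Not at hbad
            have h9 : c0 ≤ '9' := hbad.2
            have h0 : '0' ≤ c0 := le_of_not_gt fun h => hm (hbad.1 h)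
            simp only [okChar, Bool.or_eq_true, Bool.and_eq_true, decide_eq_true_eq]
            exact Or.inr ⟨h0, h9⟩
          have h2 : (decide ('0' ≤ c0) && decide (c0 ≤ '9')) = true := by
            simpa [okChar, hdot] using hok
          simp only [if_neg hdot, if_neg hbad, if_neg hm, (validNumLoopA_char rest).1,
            List.all_cons]
          simp [hdot, okChar, h2]
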